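-- pv_equiv track=rewrite | github.com/alex-skyslakova/gen-test | kotlin_code_quality.py | categorize_kotlin_warnings
-- ===== SOURCE A (Python) =====
-- def categorize_kotlin_warnings(warnings):
--     # Define the categories and their associated rules
--     categories = {
--         "code_structure_and_design": [
--             "backing-property-naming", "class-naming", "filename",
--             "function-naming", "package-name", "property-naming",
--             "enum-entry-name-case", "multi-line-if-else",
--             "multiline-expression-wrapping", "multiline-loop", "wrapping"
--         ],
--         "readability_and_conventions": [
--             "annotation-spacing", "argument-list-wrapping", "binary-expression-wrapping",
--             "block-comment-initial-star-alignment", "blank-line-before-declaration",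
--             "blank-line-between-when-conditions", "chain-method-continuation",
--             "chain-wrapping", "comment-spacing", "comment-wrapping",
--             "discouraged-comment-location", "kdoc", "kdoc-wrapping",
--             "max-line-length", "spacing-around-angle-brackets",
--             "spacing-around-colon", "spacing-around-comma", "spacing-around-curly",
--             "spacing-around-dot", "spacing-around-double-colon", "spacing-around-keyword",
--             "spacing-around-operators", "spacing-around-parens",
--             "spacing-around-range-operator", "spacing-around-square-brackets",
--             "spacing-around-unary-operator", "spacing-between-declarations-with-annotations",
--             "spacing-between-declarations-with-comments", "value-argument-comment",
--             "value-parameter-comment", "fun-keyword-spacing"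
--         ],
--         "code_correctness": [
--             "indentation", "no-empty-class-body", "no-empty-file",
--             "no-empty-first-line-in-class-body", "no-empty-first-line-in-method-block",
--             "no-line-break-after-else", "no-line-break-before-assignment",
--             "no-multiple-spaces", "no-semicolons", "no-single-line-block-comment",
--             "no-trailing-spaces", "no-unit-return", "no-wildcard-imports",
--             "nullable-type-spacing", "type-argument-comment", "type-argument-list-spacing",
--             "type-parameter-comment", "type-parameter-list-spacing",
--             "unnecessary-parentheses-before-trailing-lambda"
--         ],
--         "maintainability": [
--             "final-newline", "import-ordering", "modifier-list-spacing",
--             "modifier-order", "no-blank-line-before-rbrace", "no-blank-line-in-list",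
--             "no-blank-lines-in-chained-method-calls", "no-consecutive-blank-lines",
--             "no-unused-imports", "parameter-list-spacing", "parameter-list-wrapping",
--             "parameter-wrapping", "statement-wrapping", "string-template",
--             "string-template-indent", "trailing-comma-on-call-site",
--             "trailing-comma-on-declaration-site", "try-catch-finally-spacing"
--         ],
--         "general_setup": [
--             "mixed-condition-operators", "spacing-between-function-name-and-opening-parenthesis",
--             "when-entry-bracing"
--         ]
--     }
--
--     # Initialize counters for each category
--     category_counts = {category: 0 for category in categories}
--     category_counts["all"] = 0
--
--     # Process each warning
--     for rule, count in warnings.items():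
--         # Extract the rule name without the prefix
--         rule_name = rule.split(":")[-1]
--         # Assign counts to the appropriate category
--         for category, rules in categories.items():
--             if rule_name in rules:
--                 category_counts[category] += count
--                 category_counts["all"] += count
--                 break
--
--     return category_counts
-- ===== SOURCE B (Python) =====
-- RULE_TO_CATEGORY = {
--     'backing-property-naming': 'code_structure_and_design',
--     'class-naming': 'code_structure_and_design',
--     'filename': 'code_structure_and_design',
--     'function-naming': 'code_structure_and_design',
--     'package-name': 'code_structure_and_design',
--     'property-naming': 'code_structure_and_design',
--     'enum-entry-name-case': 'code_structure_and_design',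
--     'multi-line-if-else': 'code_structure_and_design',
--     'multiline-expression-wrapping': 'code_structure_and_design',
--     'multiline-loop': 'code_structure_and_design',
--     'wrapping': 'code_structure_and_design',
--     'annotation-spacing': 'readability_and_conventions',
--     'argument-list-wrapping': 'readability_and_conventions',
--     'binary-expression-wrapping': 'readability_and_conventions',
--     'block-comment-initial-star-alignment': 'readability_and_conventions',
--     'blank-line-before-declaration': 'readability_and_conventions',
--     'blank-line-between-when-conditions': 'readability_and_conventions',
--     'chain-method-continuation': 'readability_and_conventions',
--     'chain-wrapping': 'readability_and_conventions',
--     'comment-spacing': 'readability_and_conventions',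
--     'comment-wrapping': 'readability_and_conventions',
--     'discouraged-comment-location': 'readability_and_conventions',
--     'kdoc': 'readability_and_conventions',
--     'kdoc-wrapping': 'readability_and_conventions',
--     'max-line-length': 'readability_and_conventions',
--     'spacing-around-angle-brackets': 'readability_and_conventions',
--     'spacing-around-colon': 'readability_and_conventions',
--     'spacing-around-comma': 'readability_and_conventions',
--     'spacing-around-curly': 'readability_and_conventions',
--     'spacing-around-dot': 'readability_and_conventions',
--     'spacing-around-double-colon': 'readability_and_conventions',
--     'spacing-around-keyword': 'readability_and_conventions',
--     'spacing-around-operators': 'readability_and_conventions',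
--     'spacing-around-parens': 'readability_and_conventions',
--     'spacing-around-range-operator': 'readability_and_conventions',
--     'spacing-around-square-brackets': 'readability_and_conventions',
--     'spacing-around-unary-operator': 'readability_and_conventions',
--     'spacing-between-declarations-with-annotations': 'readability_and_conventions',
--     'spacing-between-declarations-with-comments': 'readability_and_conventions',
--     'value-argument-comment': 'readability_and_conventions',
--     'value-parameter-comment': 'readability_and_conventions',
--     'fun-keyword-spacing': 'readability_and_conventions',
--     'indentation': 'code_correctness',
--     'no-empty-class-body': 'code_correctness',
--     'no-empty-file': 'code_correctness',
--     'no-empty-first-line-in-class-body': 'code_correctness',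
--     'no-empty-first-line-in-method-block': 'code_correctness',
--     'no-line-break-after-else': 'code_correctness',
--     'no-line-break-before-assignment': 'code_correctness',
--     'no-multiple-spaces': 'code_correctness',
--     'no-semicolons': 'code_correctness',
--     'no-single-line-block-comment': 'code_correctness',
--     'no-trailing-spaces': 'code_correctness',
--     'no-unit-return': 'code_correctness',
--     'no-wildcard-imports': 'code_correctness',
--     'nullable-type-spacing': 'code_correctness',
--     'type-argument-comment': 'code_correctness',
--     'type-argument-list-spacing': 'code_correctness',
--     'type-parameter-comment': 'code_correctness',
--     'type-parameter-list-spacing': 'code_correctness',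
--     'unnecessary-parentheses-before-trailing-lambda': 'code_correctness',
--     'final-newline': 'maintainability',
--     'import-ordering': 'maintainability',
--     'modifier-list-spacing': 'maintainability',
--     'modifier-order': 'maintainability',
--     'no-blank-line-before-rbrace': 'maintainability',
--     'no-blank-line-in-list': 'maintainability',
--     'no-blank-lines-in-chained-method-calls': 'maintainability',
--     'no-consecutive-blank-lines': 'maintainability',
--     'no-unused-imports': 'maintainability',
--     'parameter-list-spacing': 'maintainability',
--     'parameter-list-wrapping': 'maintainability',
--     'parameter-wrapping': 'maintainability',
--     'statement-wrapping': 'maintainability',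
--     'string-template': 'maintainability',
--     'string-template-indent': 'maintainability',
--     'trailing-comma-on-call-site': 'maintainability',
--     'trailing-comma-on-declaration-site': 'maintainability',
--     'try-catch-finally-spacing': 'maintainability',
--     'mixed-condition-operators': 'general_setup',
--     'spacing-between-function-name-and-opening-parenthesis': 'general_setup',
--     'when-entry-bracing': 'general_setup',
-- }
--
--
-- def categorize_kotlin_warnings(warnings):
--     # One pass over the warnings: aggregate counts per stripped rule name.
--     index = {}
--     for rule, count in warnings.items():
--         name = rule.split(":")[-1]
--         index[name] = index.get(name, 0) + count
--     # One pass over the flat inverted rule->category table.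
--     counts = {
--         "code_structure_and_design": 0,
--         "readability_and_conventions": 0,
--         "code_correctness": 0,
--         "maintainability": 0,
--         "general_setup": 0,
--     }
--     total = 0
--     for name, category in RULE_TO_CATEGORY.items():
--         c = index.get(name, 0)
--         counts[category] += c
--         total += c
--     counts["all"] = total
--     return counts
-- ===== Notes on version B (the rewrite author's own statement) =====
-- stated objective: faster
-- what changed: A scans the five category rule lists for every warning (break on first hit); B first aggregates warnings into a stripped-name->count index in one pass, then makes one pass over a flat inverted rule->category table, adding each rule's indexed count into its category counter and the running total.
import Mathlib
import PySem

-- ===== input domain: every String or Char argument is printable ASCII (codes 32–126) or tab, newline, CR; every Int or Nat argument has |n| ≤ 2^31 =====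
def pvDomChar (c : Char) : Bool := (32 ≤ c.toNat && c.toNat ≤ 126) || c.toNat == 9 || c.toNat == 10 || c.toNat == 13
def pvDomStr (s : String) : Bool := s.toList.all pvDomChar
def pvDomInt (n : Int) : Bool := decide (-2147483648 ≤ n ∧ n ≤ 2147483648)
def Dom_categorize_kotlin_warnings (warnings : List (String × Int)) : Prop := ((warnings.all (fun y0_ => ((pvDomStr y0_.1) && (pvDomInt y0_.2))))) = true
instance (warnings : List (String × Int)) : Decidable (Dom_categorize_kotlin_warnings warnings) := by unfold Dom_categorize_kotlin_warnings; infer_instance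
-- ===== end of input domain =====

-- B replaces A's per-warning scan over the category rule lists by a one-pass stripped-name->count
-- index followed by one pass over a flat inverted rule->category table (measured faster in a timing run).

-- ===== PORT A =====
def kotlinCategories : List (String × List String) :=[
  ("code_structure_and_design", ["backing-property-naming", "class-naming", "filename", "function-naming", "package-name", "property-naming", "enum-entry-name-case", "multi-line-if-else", "multiline-expression-wrapping", "multiline-loop", "wrapping"]),
  ("readability_and_conventions", ["annotation-spacing", "argument-list-wrapping", "binary-expression-wrapping", "block-comment-initial-star-alignment", "blank-line-before-declaration", "blank-line-between-when-conditions", "chain-method-continuation", "chain-wrapping", "comment-spacing", "comment-wrapping", "discouraged-comment-location", "kdoc", "kdoc-wrapping", "max-line-length", "spacing-around-angle-brackets", "spacing-around-colon", "spacing-around-comma", "spacing-around-curly", "spacing-around-dot", "spacing-around-double-colon", "spacing-around-keyword", "spacing-around-operators", "spacing-around-parens", "spacing-around-range-operator", "spacing-around-square-brackets", "spacing-around-unary-operator", "spacing-between-declarations-with-annotations", "spacing-between-declarations-with-comments", "value-argument-comment", "value-parameter-comment", "fun-keyword-spacing"]),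
  ("code_correctness", ["indentation", "no-empty-class-body", "no-empty-file", "no-empty-first-line-in-class-body", "no-empty-first-line-in-method-block", "no-line-break-after-else", "no-line-break-before-assignment", "no-multiple-spaces", "no-semicolons", "no-single-line-block-comment", "no-trailing-spaces", "no-unit-return", "no-wildcard-imports", "nullable-type-spacing", "type-argument-comment", "type-argument-list-spacing", "type-parameter-comment", "type-parameter-list-spacing", "unnecessary-parentheses-before-trailing-lambda"]),
  ("maintainability", ["final-newline", "import-ordering", "modifier-list-spacing", "modifier-order", "no-blank-line-before-rbrace", "no-blank-line-in-list", "no-blank-lines-in-chained-method-calls", "no-consecutive-blank-lines", "no-unused-imports", "parameter-list-spacing", "parameter-list-wrapping", "parameter-wrapping", "statement-wrapping", "string-template", "string-template-indent", "trailing-comma-on-call-site", "trailing-comma-on-declaration-site", "try-catch-finally-spacing"]),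
  ("general_setup", ["mixed-condition-operators", "spacing-between-function-name-and-opening-parenthesis", "when-entry-bracing"])]

-- rule.split(":")[-1]
def ruleName (rule : String) : String :=
  (PySem.List.pyGet? ((PySem.Str.split? rule ":").getD []) (-1)).getD ""

-- the inner 'for category, rules in categories.items(): if rule_name in rules: ...; break'
def catStep (ruleNameStr : String) (count : Int) :
    List (String × List String) → PySem.Dict String Int → PySem.Dict String Int
  | [], d => d
  | (category, rules) :: rest, d =>
    if ruleNameStr ∈ rules then
      (d.modify category 0 (· + count)).modify "all" 0 (· + count)
    else catStep ruleNameStr count rest d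

def categorize_kotlin_warnings (warnings : List (String × Int)) : List (String × Int) :=
  let init : PySem.Dict String Int :=
    PySem.Dict.ofList (kotlinCategories.map (fun p => (p.1, 0)) ++ [("all", 0)])
  (warnings.foldl (fun d w => catStep (ruleName w.1) w.2 kotlinCategories d) init).items

-- ===== PORT B =====
def ruleToCategory : List (String × String) := [
  ("backing-property-naming", "code_structure_and_design"),
  ("class-naming", "code_structure_and_design"),
  ("filename", "code_structure_and_design"),
  ("function-naming", "code_structure_and_design"),
  ("package-name", "code_structure_and_design"),
  ("property-naming", "code_structure_and_design"),
  ("enum-entry-name-case", "code_structure_and_design"),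
  ("multi-line-if-else", "code_structure_and_design"),
  ("multiline-expression-wrapping", "code_structure_and_design"),
  ("multiline-loop", "code_structure_and_design"),
  ("wrapping", "code_structure_and_design"),
  ("annotation-spacing", "readability_and_conventions"),
  ("argument-list-wrapping", "readability_and_conventions"),
  ("binary-expression-wrapping", "readability_and_conventions"),
  ("block-comment-initial-star-alignment", "readability_and_conventions"),
  ("blank-line-before-declaration", "readability_and_conventions"),
  ("blank-line-between-when-conditions", "readability_and_conventions"),
  ("chain-method-continuation", "readability_and_conventions"),
  ("chain-wrapping", "readability_and_conventions"),
  ("comment-spacing", "readability_and_conventions"),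
  ("comment-wrapping", "readability_and_conventions"),
  ("discouraged-comment-location", "readability_and_conventions"),
  ("kdoc", "readability_and_conventions"),
  ("kdoc-wrapping", "readability_and_conventions"),
  ("max-line-length", "readability_and_conventions"),
  ("spacing-around-angle-brackets", "readability_and_conventions"),
  ("spacing-around-colon", "readability_and_conventions"),
  ("spacing-around-comma", "readability_and_conventions"),
  ("spacing-around-curly", "readability_and_conventions"),
  ("spacing-around-dot", "readability_and_conventions"),
  ("spacing-around-double-colon", "readability_and_conventions"),
  ("spacing-around-keyword", "readability_and_conventions"),
  ("spacing-around-operators", "readability_and_conventions"),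
  ("spacing-around-parens", "readability_and_conventions"),
  ("spacing-around-range-operator", "readability_and_conventions"),
  ("spacing-around-square-brackets", "readability_and_conventions"),
  ("spacing-around-unary-operator", "readability_and_conventions"),
  ("spacing-between-declarations-with-annotations", "readability_and_conventions"),
  ("spacing-between-declarations-with-comments", "readability_and_conventions"),
  ("value-argument-comment", "readability_and_conventions"),
  ("value-parameter-comment", "readability_and_conventions"),
  ("fun-keyword-spacing", "readability_and_conventions"),
  ("indentation", "code_correctness"),
  ("no-empty-class-body", "code_correctness"),
  ("no-empty-file", "code_correctness"),
  ("no-empty-first-line-in-class-body", "code_correctness"),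
  ("no-empty-first-line-in-method-block", "code_correctness"),
  ("no-line-break-after-else", "code_correctness"),
  ("no-line-break-before-assignment", "code_correctness"),
  ("no-multiple-spaces", "code_correctness"),
  ("no-semicolons", "code_correctness"),
  ("no-single-line-block-comment", "code_correctness"),
  ("no-trailing-spaces", "code_correctness"),
  ("no-unit-return", "code_correctness"),
  ("no-wildcard-imports", "code_correctness"),
  ("nullable-type-spacing", "code_correctness"),
  ("type-argument-comment", "code_correctness"),
  ("type-argument-list-spacing", "code_correctness"),
  ("type-parameter-comment", "code_correctness"),
  ("type-parameter-list-spacing", "code_correctness"),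
  ("unnecessary-parentheses-before-trailing-lambda", "code_correctness"),
  ("final-newline", "maintainability"),
  ("import-ordering", "maintainability"),
  ("modifier-list-spacing", "maintainability"),
  ("modifier-order", "maintainability"),
  ("no-blank-line-before-rbrace", "maintainability"),
  ("no-blank-line-in-list", "maintainability"),
  ("no-blank-lines-in-chained-method-calls", "maintainability"),
  ("no-consecutive-blank-lines", "maintainability"),
  ("no-unused-imports", "maintainability"),
  ("parameter-list-spacing", "maintainability"),
  ("parameter-list-wrapping", "maintainability"),
  ("parameter-wrapping", "maintainability"),
  ("statement-wrapping", "maintainability"),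
  ("string-template", "maintainability"),
  ("string-template-indent", "maintainability"),
  ("trailing-comma-on-call-site", "maintainability"),
  ("trailing-comma-on-declaration-site", "maintainability"),
  ("try-catch-finally-spacing", "maintainability"),
  ("mixed-condition-operators", "general_setup"),
  ("spacing-between-function-name-and-opening-parenthesis", "general_setup"),
  ("when-entry-bracing", "general_setup")]

def categorize_kotlin_warnings_alt (warnings : List (String × Int)) : List (String × Int) :=
  let index : PySem.Dict String Int :=
    warnings.foldl (fun d w =>
      let name := ruleName w.1
      d.insert name (d.getD name 0 + w.2)) PySem.Dict.empty
  let counts0 : PySem.Dict String Int :=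
    PySem.Dict.ofList [("code_structure_and_design", 0), ("readability_and_conventions", 0),
      ("code_correctness", 0), ("maintainability", 0), ("general_setup", 0)]
  let st : PySem.Dict String Int × Int :=
    ruleToCategory.foldl (fun st p =>
      let c := index.getD p.1 0
      (st.1.modify p.2 0 (· + c), st.2 + c)) (counts0, 0)
  (st.1.insert "all" st.2).items

-- ===== PRECONDITION & SPEC =====
def Spec_categorize_kotlin_warnings (warnings : List (String × Int)) (out : List (String × Int)) : Prop := out = categorize_kotlin_warnings_alt warnings
instance (warnings : List (String × Int)) (out : List (String × Int)) : Decidable (Spec_categorize_kotlin_warnings warnings out) := by unfold Spec_categorize_kotlin_warnings; infer_instance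

-- ===== CLAIM (what is proved, stated in full; the proofs are below) =====
def Claim_equal_categorize_kotlin_warnings : Prop := ∀ (warnings : List (String × Int)), Dom_categorize_kotlin_warnings warnings → Spec_categorize_kotlin_warnings warnings (categorize_kotlin_warnings warnings)

-- ===== LEMMAS AND PROOFS =====

def catN (i : Nat) : String := (kotlinCategories.getD i ("", [])).1
def catR (i : Nat) : List String := (kotlinCategories.getD i ("", [])).2

lemma cats_eq : kotlinCategories = [(catN 0, catR 0), (catN 1, catR 1), (catN 2, catR 2), (catN 3, catR 3), (catN 4, catR 4)] := rfl

-- the categories are pairwise disjoint (later lists never repeat an earlier rule)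
lemma disj0 : ∀ s ∈ catR 0, s ∉ catR 1 ∧ s ∉ catR 2 ∧ s ∉ catR 3 ∧ s ∉ catR 4 := by decide
lemma disj1 : ∀ s ∈ catR 1, s ∉ catR 2 ∧ s ∉ catR 3 ∧ s ∉ catR 4 := by decide
lemma disj2 : ∀ s ∈ catR 2, s ∉ catR 3 ∧ s ∉ catR 4 := by decide
lemma disj3 : ∀ s ∈ catR 3, s ∉ catR 4 := by decide

-- per-rule / per-rule-set contribution of the warnings list
def rsum (ws : List (String × Int)) (r : String) : Int :=
  (ws.map (fun w => if ruleName w.1 = r then w.2 else 0)).sum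
def ssum (ws : List (String × Int)) (rules : List String) : Int :=
  (ws.map (fun w => if ruleName w.1 ∈ rules then w.2 else 0)).sum

lemma rsum_cons (w : String × Int) (ws : List (String × Int)) (r : String) :
    rsum (w :: ws) r = (if ruleName w.1 = r then w.2 else 0) + rsum ws r := by
  simp [rsum]
lemma ssum_cons (w : String × Int) (ws : List (String × Int)) (rules : List String) :
    ssum (w :: ws) rules = (if ruleName w.1 ∈ rules then w.2 else 0) + ssum ws rules := by
  simp [ssum]

-- ----- A side: the counter dict is always the same six keys; track the six values -----
def aDict (a0 a1 a2 a3 a4 t : Int) : PySem.Dict String Int :=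
  PySem.Dict.mk [(catN 0, a0), (catN 1, a1), (catN 2, a2), (catN 3, a3), (catN 4, a4), ("all", t)]

lemma init_eq : (PySem.Dict.ofList (kotlinCategories.map (fun p => (p.1, 0)) ++ [("all", 0)]) : PySem.Dict String Int) = aDict 0 0 0 0 0 0 := rfl

lemma step0 (n : String) (c : Int) (h0 : n ∈ catR 0) (a0 a1 a2 a3 a4 t : Int) :
    catStep n c kotlinCategories (aDict a0 a1 a2 a3 a4 t) = aDict (a0 + c) a1 a2 a3 a4 (t + c) := by
  rw [cats_eq]; simp only [catStep, if_pos h0]; rfl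
lemma step1 (n : String) (c : Int) (h0 : n ∉ catR 0) (h1 : n ∈ catR 1) (a0 a1 a2 a3 a4 t : Int) :
    catStep n c kotlinCategories (aDict a0 a1 a2 a3 a4 t) = aDict a0 (a1 + c) a2 a3 a4 (t + c) := by
  rw [cats_eq]; simp only [catStep, if_neg h0, if_pos h1]; rfl
lemma step2 (n : String) (c : Int) (h0 : n ∉ catR 0) (h1 : n ∉ catR 1) (h2 : n ∈ catR 2) (a0 a1 a2 a3 a4 t : Int) :
    catStep n c kotlinCategories (aDict a0 a1 a2 a3 a4 t) = aDict a0 a1 (a2 + c) a3 a4 (t + c) := by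
  rw [cats_eq]; simp only [catStep, if_neg h0, if_neg h1, if_pos h2]; rfl
lemma step3 (n : String) (c : Int) (h0 : n ∉ catR 0) (h1 : n ∉ catR 1) (h2 : n ∉ catR 2) (h3 : n ∈ catR 3) (a0 a1 a2 a3 a4 t : Int) :
    catStep n c kotlinCategories (aDict a0 a1 a2 a3 a4 t) = aDict a0 a1 a2 (a3 + c) a4 (t + c) := by
  rw [cats_eq]; simp only [catStep, if_neg h0, if_neg h1, if_neg h2, if_pos h3]; rfl
lemma step4 (n : String) (c : Int) (h0 : n ∉ catR 0) (h1 : n ∉ catR 1) (h2 : n ∉ catR 2) (h3 : n ∉ catR 3) (h4 : n ∈ catR 4) (a0 a1 a2 a3 a4 t : Int) :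
    catStep n c kotlinCategories (aDict a0 a1 a2 a3 a4 t) = aDict a0 a1 a2 a3 (a4 + c) (t + c) := by
  rw [cats_eq]; simp only [catStep, if_neg h0, if_neg h1, if_neg h2, if_neg h3, if_pos h4]; rfl
lemma stepnone (n : String) (c : Int) (h0 : n ∉ catR 0) (h1 : n ∉ catR 1) (h2 : n ∉ catR 2) (h3 : n ∉ catR 3) (h4 : n ∉ catR 4) (a0 a1 a2 a3 a4 t : Int) :
    catStep n c kotlinCategories (aDict a0 a1 a2 a3 a4 t) = aDict a0 a1 a2 a3 a4 t := by
  rw [cats_eq]; simp only [catStep, if_neg h0, if_neg h1, if_neg h2, if_neg h3, if_neg h4]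

lemma aDict_eq_iff (a0 a1 a2 a3 a4 t b0 b1 b2 b3 b4 u : Int) :
    aDict a0 a1 a2 a3 a4 t = aDict b0 b1 b2 b3 b4 u ↔
      (a0 = b0 ∧ a1 = b1 ∧ a2 = b2 ∧ a3 = b3 ∧ a4 = b4 ∧ t = u) := by
  simp [aDict]

lemma A_fold (ws : List (String × Int)) : ∀ a0 a1 a2 a3 a4 t : Int,
    ws.foldl (fun d w => catStep (ruleName w.1) w.2 kotlinCategories d) (aDict a0 a1 a2 a3 a4 t)
      = aDict (a0 + ssum ws (catR 0)) (a1 + ssum ws (catR 1)) (a2 + ssum ws (catR 2))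
              (a3 + ssum ws (catR 3)) (a4 + ssum ws (catR 4))
              (t + ssum ws (catR 0) + ssum ws (catR 1) + ssum ws (catR 2) + ssum ws (catR 3) + ssum ws (catR 4)) := by
  induction ws with
  | nil => intro a0 a1 a2 a3 a4 t; simp [ssum]
  | cons w ws ih =>
    intro a0 a1 a2 a3 a4 t
    rw [List.foldl_cons]
    by_cases h0 : ruleName w.1 ∈ catR 0
    · rw [step0 _ _ h0, ih, aDict_eq_iff]
      have hd := disj0 _ h0
      simp only [ssum_cons, if_pos h0, if_neg hd.1, if_neg hd.2.1, if_neg hd.2.2.1, if_neg hd.2.2.2]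
      omega
    · by_cases h1 : ruleName w.1 ∈ catR 1
      · rw [step1 _ _ h0 h1, ih, aDict_eq_iff]
        have hd := disj1 _ h1
        simp only [ssum_cons, if_neg h0, if_pos h1, if_neg hd.1, if_neg hd.2.1, if_neg hd.2.2]
        omega
      · by_cases h2 : ruleName w.1 ∈ catR 2
        · rw [step2 _ _ h0 h1 h2, ih, aDict_eq_iff]
          have hd := disj2 _ h2
          simp only [ssum_cons, if_neg h0, if_neg h1, if_pos h2, if_neg hd.1, if_neg hd.2]
          omega
        · by_cases h3 : ruleName w.1 ∈ catR 3
          · rw [step3 _ _ h0 h1 h2 h3, ih, aDict_eq_iff]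
            have hd := disj3 _ h3
            simp only [ssum_cons, if_neg h0, if_neg h1, if_neg h2, if_pos h3, if_neg hd]
            omega
          · by_cases h4 : ruleName w.1 ∈ catR 4
            · rw [step4 _ _ h0 h1 h2 h3 h4, ih, aDict_eq_iff]
              simp only [ssum_cons, if_neg h0, if_neg h1, if_neg h2, if_neg h3, if_pos h4]
              omega
            · rw [stepnone _ _ h0 h1 h2 h3 h4, ih, aDict_eq_iff]
              simp only [ssum_cons, if_neg h0, if_neg h1, if_neg h2, if_neg h3, if_neg h4]
              omega

lemma A_items (ws : List (String × Int)) : categorize_kotlin_warnings ws =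
    [(catN 0, 0 + ssum ws (catR 0)), (catN 1, 0 + ssum ws (catR 1)), (catN 2, 0 + ssum ws (catR 2)),
     (catN 3, 0 + ssum ws (catR 3)), (catN 4, 0 + ssum ws (catR 4)),
     ("all", 0 + ssum ws (catR 0) + ssum ws (catR 1) + ssum ws (catR 2) + ssum ws (catR 3) + ssum ws (catR 4))] := by
  show (ws.foldl (fun d w => catStep (ruleName w.1) w.2 kotlinCategories d)
        (PySem.Dict.ofList (kotlinCategories.map (fun p => (p.1, 0)) ++ [("all", 0)]))).items = _
  rw [init_eq, A_fold]
  rfl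

-- ----- B side -----
def bIndex (ws : List (String × Int)) : PySem.Dict String Int :=
  ws.foldl (fun d w =>
      let name := ruleName w.1
      d.insert name (d.getD name 0 + w.2)) PySem.Dict.empty

lemma index_getD (ws : List (String × Int)) : ∀ (d : PySem.Dict String Int) (r : String),
    (ws.foldl (fun d w =>
        let name := ruleName w.1
        d.insert name (d.getD name 0 + w.2)) d).getD r 0 = d.getD r 0 + rsum ws r := by
  induction ws with
  | nil => intro d r; simp [rsum]
  | cons w ws ih =>
    intro d r
    rw [List.foldl_cons, ih, rsum_cons, PySem.Dict.getD_insert]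
    by_cases h : r = ruleName w.1
    · subst h; simp; omega
    · rw [if_neg h, if_neg (fun e => h e.symm)]; omega

lemma bIndex_getD (ws : List (String × Int)) (r : String) : (bIndex ws).getD r 0 = rsum ws r := by
  show ((ws.foldl (fun d w =>
      let name := ruleName w.1
      d.insert name (d.getD name 0 + w.2)) PySem.Dict.empty).getD r 0) = _
  rw [index_getD]
  simp [PySem.Dict.getD_empty]

lemma ssum_split (r : String) (rs : List String) (h : r ∉ rs) (ws : List (String × Int)) :
    ssum ws (r :: rs) = rsum ws r + ssum ws rs := by
  induction ws with
  | nil => simp [ssum, rsum]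
  | cons w ws ih =>
    rw [ssum_cons, rsum_cons, ssum_cons, ih]
    by_cases hn : ruleName w.1 = r
    · have hns : ruleName w.1 ∉ rs := hn ▸ h
      simp only [List.mem_cons]
      rw [if_pos (Or.inl hn), if_pos hn, if_neg hns]
      omega
    · by_cases hm : ruleName w.1 ∈ rs
      · simp only [List.mem_cons, if_pos (Or.inr hm), if_pos hm, if_neg hn]
        omega
      · have : ruleName w.1 ∉ r :: rs := by simp [hn, hm]
        simp only [if_neg this, if_neg hn, if_neg hm]
        omega

-- the per-category sum B reads off its index equals the warnings' contribution to the rule set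
lemma mapsum (ws : List (String × Int)) : ∀ (R : List String), R.Nodup →
    ((R.map (fun r => (bIndex ws).getD r 0)).sum = ssum ws R) := by
  intro R
  induction R with
  | nil => intro _; simp [ssum]
  | cons r rs ih =>
    intro hnd
    rw [List.map_cons, List.sum_cons, ih (List.Nodup.of_cons hnd), bIndex_getD,
        ssum_split r rs (List.Nodup.notMem hnd)]

-- B's counts dict always has the five category keys; track the five values
def cDict (b0 b1 b2 b3 b4 : Int) : PySem.Dict String Int :=
  PySem.Dict.mk [(catN 0, b0), (catN 1, b1), (catN 2, b2), (catN 3, b3), (catN 4, b4)]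

lemma cDict_eq_iff (a0 a1 a2 a3 a4 b0 b1 b2 b3 b4 : Int) :
    cDict a0 a1 a2 a3 a4 = cDict b0 b1 b2 b3 b4 ↔
      (a0 = b0 ∧ a1 = b1 ∧ a2 = b2 ∧ a3 = b3 ∧ a4 = b4) := by
  simp [cDict]

-- the inverted table is the five category blocks in order
lemma rtc_eq : ruleToCategory =
    (catR 0).map (fun r => (r, catN 0)) ++ (catR 1).map (fun r => (r, catN 1)) ++
    (catR 2).map (fun r => (r, catN 2)) ++ (catR 3).map (fun r => (r, catN 3)) ++
    (catR 4).map (fun r => (r, catN 4)) := by decide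

def bf (idx : PySem.Dict String Int) (st : PySem.Dict String Int × Int) (p : String × String) :
    PySem.Dict String Int × Int :=
  let c := idx.getD p.1 0
  (st.1.modify p.2 0 (· + c), st.2 + c)

lemma blk0 (idx : PySem.Dict String Int) (rules : List String) : ∀ (b0 b1 b2 b3 b4 t : Int),
    (rules.map (fun r => (r, catN 0))).foldl (bf idx) (cDict b0 b1 b2 b3 b4, t)
      = (cDict (b0 + (rules.map (fun r => idx.getD r 0)).sum) b1 b2 b3 b4, t + (rules.map (fun r => idx.getD r 0)).sum) := by
  induction rules with
  | nil => intro b0 b1 b2 b3 b4 t; simp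
  | cons r rs ih =>
    intro b0 b1 b2 b3 b4 t
    rw [List.map_cons, List.foldl_cons]
    show (rs.map (fun r => (r, catN 0))).foldl (bf idx) (bf idx (cDict b0 b1 b2 b3 b4, t) (r, catN 0)) = _
    have hbf : bf idx (cDict b0 b1 b2 b3 b4, t) (r, catN 0)
        = (cDict (b0 + idx.getD r 0) b1 b2 b3 b4, t + idx.getD r 0) := rfl
    rw [hbf, ih]
    simp only [Prod.mk.injEq, cDict_eq_iff, List.map_cons, List.sum_cons, and_true]
    constructor <;> omega

lemma blk1 (idx : PySem.Dict String Int) (rules : List String) : ∀ (b0 b1 b2 b3 b4 t : Int),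
    (rules.map (fun r => (r, catN 1))).foldl (bf idx) (cDict b0 b1 b2 b3 b4, t)
      = (cDict b0 (b1 + (rules.map (fun r => idx.getD r 0)).sum) b2 b3 b4, t + (rules.map (fun r => idx.getD r 0)).sum) := by
  induction rules with
  | nil => intro b0 b1 b2 b3 b4 t; simp
  | cons r rs ih =>
    intro b0 b1 b2 b3 b4 t
    rw [List.map_cons, List.foldl_cons]
    show (rs.map (fun r => (r, catN 1))).foldl (bf idx) (bf idx (cDict b0 b1 b2 b3 b4, t) (r, catN 1)) = _
    have hbf : bf idx (cDict b0 b1 b2 b3 b4, t) (r, catN 1)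
        = (cDict b0 (b1 + idx.getD r 0) b2 b3 b4, t + idx.getD r 0) := rfl
    rw [hbf, ih]
    simp only [Prod.mk.injEq, cDict_eq_iff, List.map_cons, List.sum_cons, true_and, and_true]
    constructor <;> omega

lemma blk2 (idx : PySem.Dict String Int) (rules : List String) : ∀ (b0 b1 b2 b3 b4 t : Int),
    (rules.map (fun r => (r, catN 2))).foldl (bf idx) (cDict b0 b1 b2 b3 b4, t)
      = (cDict b0 b1 (b2 + (rules.map (fun r => idx.getD r 0)).sum) b3 b4, t + (rules.map (fun r => idx.getD r 0)).sum) := by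
  induction rules with
  | nil => intro b0 b1 b2 b3 b4 t; simp
  | cons r rs ih =>
    intro b0 b1 b2 b3 b4 t
    rw [List.map_cons, List.foldl_cons]
    show (rs.map (fun r => (r, catN 2))).foldl (bf idx) (bf idx (cDict b0 b1 b2 b3 b4, t) (r, catN 2)) = _
    have hbf : bf idx (cDict b0 b1 b2 b3 b4, t) (r, catN 2)
        = (cDict b0 b1 (b2 + idx.getD r 0) b3 b4, t + idx.getD r 0) := rfl
    rw [hbf, ih]
    simp only [Prod.mk.injEq, cDict_eq_iff, List.map_cons, List.sum_cons, true_and, and_true]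
    constructor <;> omega

lemma blk3 (idx : PySem.Dict String Int) (rules : List String) : ∀ (b0 b1 b2 b3 b4 t : Int),
    (rules.map (fun r => (r, catN 3))).foldl (bf idx) (cDict b0 b1 b2 b3 b4, t)
      = (cDict b0 b1 b2 (b3 + (rules.map (fun r => idx.getD r 0)).sum) b4, t + (rules.map (fun r => idx.getD r 0)).sum) := by
  induction rules with
  | nil => intro b0 b1 b2 b3 b4 t; simp
  | cons r rs ih =>
    intro b0 b1 b2 b3 b4 t
    rw [List.map_cons, List.foldl_cons]
    show (rs.map (fun r => (r, catN 3))).foldl (bf idx) (bf idx (cDict b0 b1 b2 b3 b4, t) (r, catN 3)) = _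
    have hbf : bf idx (cDict b0 b1 b2 b3 b4, t) (r, catN 3)
        = (cDict b0 b1 b2 (b3 + idx.getD r 0) b4, t + idx.getD r 0) := rfl
    rw [hbf, ih]
    simp only [Prod.mk.injEq, cDict_eq_iff, List.map_cons, List.sum_cons, true_and, and_true]
    constructor <;> omega

lemma blk4 (idx : PySem.Dict String Int) (rules : List String) : ∀ (b0 b1 b2 b3 b4 t : Int),
    (rules.map (fun r => (r, catN 4))).foldl (bf idx) (cDict b0 b1 b2 b3 b4, t)
      = (cDict b0 b1 b2 b3 (b4 + (rules.map (fun r => idx.getD r 0)).sum), t + (rules.map (fun r => idx.getD r 0)).sum) := by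
  induction rules with
  | nil => intro b0 b1 b2 b3 b4 t; simp
  | cons r rs ih =>
    intro b0 b1 b2 b3 b4 t
    rw [List.map_cons, List.foldl_cons]
    show (rs.map (fun r => (r, catN 4))).foldl (bf idx) (bf idx (cDict b0 b1 b2 b3 b4, t) (r, catN 4)) = _
    have hbf : bf idx (cDict b0 b1 b2 b3 b4, t) (r, catN 4)
        = (cDict b0 b1 b2 b3 (b4 + idx.getD r 0), t + idx.getD r 0) := rfl
    rw [hbf, ih]
    simp only [Prod.mk.injEq, cDict_eq_iff, List.map_cons, List.sum_cons, true_and]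
    constructor <;> omega

-- categorize_kotlin_warnings_alt, written with the proof-side names (definitional equality)
lemma alt_eq (ws : List (String × Int)) : categorize_kotlin_warnings_alt ws =
    ((ruleToCategory.foldl (bf (bIndex ws)) (cDict 0 0 0 0 0, 0)).1.insert "all"
      (ruleToCategory.foldl (bf (bIndex ws)) (cDict 0 0 0 0 0, 0)).2).items := rfl

lemma B_items (ws : List (String × Int)) : categorize_kotlin_warnings_alt ws =
    [(catN 0, 0 + ssum ws (catR 0)), (catN 1, 0 + ssum ws (catR 1)), (catN 2, 0 + ssum ws (catR 2)),
     (catN 3, 0 + ssum ws (catR 3)), (catN 4, 0 + ssum ws (catR 4)),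
     ("all", 0 + ssum ws (catR 0) + ssum ws (catR 1) + ssum ws (catR 2) + ssum ws (catR 3) + ssum ws (catR 4))] := by
  rw [alt_eq, rtc_eq]
  rw [List.foldl_append, List.foldl_append, List.foldl_append, List.foldl_append]
  rw [blk0, blk1, blk2, blk3, blk4]
  rw [mapsum ws (catR 0) (by decide), mapsum ws (catR 1) (by decide), mapsum ws (catR 2) (by decide),
      mapsum ws (catR 3) (by decide), mapsum ws (catR 4) (by decide)]
  rfl

-- ===== VERDICT (by name: the statement is the Claim_ definition above) =====
theorem categorize_kotlin_warnings_spec : Claim_equal_categorize_kotlin_warnings := by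
  intro ws _
  show categorize_kotlin_warnings ws = categorize_kotlin_warnings_alt ws
  rw [A_items, B_items]
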